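-- pv_equiv track=rewrite | github.com/seanpatrickmay/PokerML | server/game_manager.py | _pair_combos
-- ===== SOURCE A (Python) =====
-- def _pair_combos(rank, board_set):
--     out = []
--     for s1 in range(4):
--         for s2 in range(s1 + 1, 4):
--             c1, c2 = rank * 4 + s1, rank * 4 + s2
--             if c1 not in board_set and c2 not in board_set:
--                 out.append((max(c1, c2), min(c1, c2)))
--     return out
-- ===== SOURCE B (Python) =====
-- # Lookup-table formulation: encode which of the rank's four cards sit on the
-- # board as a 4-bit mask, then read the suit pairs straight out of a 16-entry table.
-- _SUIT_PAIRS = {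
--     0:  [(1, 0), (2, 0), (3, 0), (2, 1), (3, 1), (3, 2)],
--     1:  [(2, 1), (3, 1), (3, 2)],
--     2:  [(2, 0), (3, 0), (3, 2)],
--     3:  [(3, 2)],
--     4:  [(1, 0), (3, 0), (3, 1)],
--     5:  [(3, 1)],
--     6:  [(3, 0)],
--     7:  [],
--     8:  [(1, 0), (2, 0), (2, 1)],
--     9:  [(2, 1)],
--     10: [(2, 0)],
--     11: [],
--     12: [(1, 0)],
--     13: [],
--     14: [],
--     15: [],
-- }
--
-- def _pair_combos(rank, board_set):
--     base = rank * 4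
--     mask = 0
--     for s in range(4):
--         if base + s in board_set:
--             mask |= 1 << s
--     return [(base + hi, base + lo) for hi, lo in _SUIT_PAIRS[mask]]
-- ===== Notes on version B (the rewrite author's own statement) =====
-- stated objective: alternative
-- what changed: B replaces the nested suit-pair loop by a bitmask of blocked suits and a precomputed 16-entry lookup table of suit pairs, then shifts the table entries by rank*4.
import Mathlib
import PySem

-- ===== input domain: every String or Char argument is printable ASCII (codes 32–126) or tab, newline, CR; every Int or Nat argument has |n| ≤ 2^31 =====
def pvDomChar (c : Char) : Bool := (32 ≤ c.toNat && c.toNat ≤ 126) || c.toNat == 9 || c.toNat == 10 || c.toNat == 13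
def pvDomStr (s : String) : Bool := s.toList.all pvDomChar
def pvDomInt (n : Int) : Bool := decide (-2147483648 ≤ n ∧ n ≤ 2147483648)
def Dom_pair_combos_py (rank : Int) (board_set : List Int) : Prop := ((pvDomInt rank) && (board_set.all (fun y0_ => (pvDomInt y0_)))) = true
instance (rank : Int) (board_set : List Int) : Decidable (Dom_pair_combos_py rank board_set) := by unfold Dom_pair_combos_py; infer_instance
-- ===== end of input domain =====

-- B replaces A's nested suit-pair loop by a 4-bit mask of blocked suits and a
-- precomputed 16-entry lookup table of suit pairs; objective: alternative.

-- ===== PORT A =====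
def pair_combos_py (rank : Int) (board_set : List Int) : List (Int × Int) :=
  (PySem.List.pyRange 0 4 1).foldl (fun out s1 =>
    (PySem.List.pyRange (s1 + 1) 4 1).foldl (fun out s2 =>
      let c1 := rank * 4 + s1
      let c2 := rank * 4 + s2
      if c1 ∉ board_set ∧ c2 ∉ board_set then
        out ++ [(max c1 c2, min c1 c2)]
      else out) out) []

-- ===== PORT B =====
-- the 16-entry table of suit pairs, keyed by the mask of blocked suits (Source B's _SUIT_PAIRS)
def pvSuitPairs : Nat → List (Int × Int)
  | 0  => [(1, 0), (2, 0), (3, 0), (2, 1), (3, 1), (3, 2)]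
  | 1  => [(2, 1), (3, 1), (3, 2)]
  | 2  => [(2, 0), (3, 0), (3, 2)]
  | 3  => [(3, 2)]
  | 4  => [(1, 0), (3, 0), (3, 1)]
  | 5  => [(3, 1)]
  | 6  => [(3, 0)]
  | 7  => []
  | 8  => [(1, 0), (2, 0), (2, 1)]
  | 9  => [(2, 1)]
  | 10 => [(2, 0)]
  | 11 => []
  | 12 => [(1, 0)]
  | _  => []

def pair_combos_py_alt (rank : Int) (board_set : List Int) : List (Int × Int) :=
  let base := rank * 4
  let mask := (PySem.List.pyRange 0 4 1).foldl (fun mask s =>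
    if base + s ∈ board_set then mask ||| (1 <<< s.toNat) else mask) 0
  (pvSuitPairs mask).map (fun p => (base + p.1, base + p.2))

-- ===== PRECONDITION & SPEC =====
def Spec_pair_combos_py (rank : Int) (board_set : List Int) (out : List (Int × Int)) : Prop := out = pair_combos_py_alt rank board_set
instance (rank : Int) (board_set : List Int) (out : List (Int × Int)) : Decidable (Spec_pair_combos_py rank board_set out) := by unfold Spec_pair_combos_py; infer_instance

-- ===== CLAIM (what is proved, stated in full; the proofs are below) =====
def Claim_equal_pair_combos_py : Prop := ∀ (rank : Int) (board_set : List Int), Dom_pair_combos_py rank board_set → Spec_pair_combos_py rank board_set (pair_combos_py rank board_set)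

-- ===== LEMMAS AND PROOFS =====
theorem pyRange04 : PySem.List.pyRange 0 4 1 = [0, 1, 2, 3] := by decide
theorem pyRange14 : PySem.List.pyRange (0 + 1) 4 1 = [1, 2, 3] := by decide
theorem pyRange24 : PySem.List.pyRange (1 + 1) 4 1 = [2, 3] := by decide
theorem pyRange34 : PySem.List.pyRange (2 + 1) 4 1 = [3] := by decide
theorem pyRange44 : PySem.List.pyRange (3 + 1) 4 1 = [] := by decide

-- ===== VERDICT (by name: the statement is the Claim_ definition above) =====
theorem pair_combos_py_spec : Claim_equal_pair_combos_py := by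
  intro rank bs _
  unfold Spec_pair_combos_py pair_combos_py pair_combos_py_alt
  have z0 : rank * 4 + 0 = rank * 4 := by ring
  have m01 : max (rank * 4) (rank * 4 + 1) = rank * 4 + 1 := by omega
  have m02 : max (rank * 4) (rank * 4 + 2) = rank * 4 + 2 := by omega
  have m03 : max (rank * 4) (rank * 4 + 3) = rank * 4 + 3 := by omega
  have m12 : max (rank * 4 + 1) (rank * 4 + 2) = rank * 4 + 2 := by omega
  have m13 : max (rank * 4 + 1) (rank * 4 + 3) = rank * 4 + 3 := by omega
  have m23 : max (rank * 4 + 2) (rank * 4 + 3) = rank * 4 + 3 := by omega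
  have n01 : min (rank * 4) (rank * 4 + 1) = rank * 4 := by omega
  have n02 : min (rank * 4) (rank * 4 + 2) = rank * 4 := by omega
  have n03 : min (rank * 4) (rank * 4 + 3) = rank * 4 := by omega
  have n12 : min (rank * 4 + 1) (rank * 4 + 2) = rank * 4 + 1 := by omega
  have n13 : min (rank * 4 + 1) (rank * 4 + 3) = rank * 4 + 1 := by omega
  have n23 : min (rank * 4 + 2) (rank * 4 + 3) = rank * 4 + 2 := by omega
  simp only [pyRange04, List.foldl, pyRange14, pyRange24, pyRange34,
    pyRange44, z0, m01, m02, m03, m12, m13, m23, n01, n02, n03, n12, n13, n23]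
  by_cases h0 : (rank * 4) ∈ bs <;> by_cases h1 : (rank * 4 + 1) ∈ bs <;>
    by_cases h2 : (rank * 4 + 2) ∈ bs <;> by_cases h3 : (rank * 4 + 3) ∈ bs <;>
      simp [h0, h1, h2, h3, pvSuitPairs]
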